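-- pv_equiv track=rewrite | github.com/Irtasam/projet-info-eivp | Projet TD EIVP final version.py | datetimelist
-- ===== SOURCE A (Python) =====
-- def datetimelist(chaine):
--     Date = []
--     nb = ''
--     for c in chaine:
--         if c in "0123456789":
--             nb += c
--         elif nb != '':
--             Date.append(int(nb))
--             nb = ''
--     if nb != '':
--         Date.append(int(nb))
--     return Date
-- ===== SOURCE B (Python) =====
-- def datetimelist(chaine):
--     res = []
--     i, n = 0, len(chaine)
--     while i < n:
--         if chaine[i] in "0123456789":
--             j = i + 1
--             while j < n and chaine[j] in "0123456789":
--                 j += 1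
--             res.append(int(chaine[i:j]))
--             i = j
--         else:
--             i += 1
--     return res
-- ===== Notes on version B (the rewrite author's own statement) =====
-- stated objective: alternative
-- what changed: B scans maximal digit runs with two index pointers and converts each run's slice directly, instead of A's per-character buffer accumulate/flush state machine.
import Mathlib
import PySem

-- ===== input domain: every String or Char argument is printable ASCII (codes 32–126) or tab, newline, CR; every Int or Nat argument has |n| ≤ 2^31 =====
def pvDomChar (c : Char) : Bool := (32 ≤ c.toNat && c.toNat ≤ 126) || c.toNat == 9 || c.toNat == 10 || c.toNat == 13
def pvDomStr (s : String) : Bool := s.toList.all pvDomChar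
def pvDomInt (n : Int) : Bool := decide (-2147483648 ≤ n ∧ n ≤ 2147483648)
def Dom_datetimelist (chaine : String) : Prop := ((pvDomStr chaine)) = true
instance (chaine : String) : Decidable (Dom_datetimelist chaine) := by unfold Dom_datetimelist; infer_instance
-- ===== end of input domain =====

-- B re-implements A as a two-pointer scan over maximal digit runs instead of A's
-- per-character accumulate/flush buffer; same O(n) cost, return values proved equal.

-- shared port of the membership test `c in "0123456789"`
def isDigC (c : Char) : Bool := "0123456789".toList.contains c

-- port of Python's builtin int() on a nonempty all-digit character buffer (exact there:
-- both programs only ever call int() on such strings)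
def digitsVal (buf : List Char) : Int :=
  buf.foldl (fun a c => 10 * a + ((c.toNat : Int) - 48)) 0

-- ===== PORT A =====
-- the loop state is (Date, nb); nb kept as List Char, `nb += c` = append
def stepA (st : List Int × List Char) (c : Char) : List Int × List Char :=
  if isDigC c then (st.1, st.2 ++ [c])
  else if st.2 ≠ [] then (st.1 ++ [digitsVal st.2], [])
  else st

def datetimelist (chaine : String) : List Int :=
  let st := chaine.toList.foldl stepA ([], [])
  if st.2 ≠ [] then st.1 ++ [digitsVal st.2] else st.1

-- ===== PORT B =====
-- the outer while advances char by char; on a digit it scans the maximal run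
-- (inner while = takeWhile/dropWhile of the rest) and converts its slice
def altGo : List Char → List Int
  | [] => []
  | c :: cs =>
    if isDigC c then
      digitsVal (c :: cs.takeWhile isDigC) :: altGo (cs.dropWhile isDigC)
    else altGo cs
termination_by l => l.length
decreasing_by
  · exact Nat.lt_succ_of_le (cs.length_dropWhile_le _)
  · simp

def datetimelist_alt (chaine : String) : List Int := altGo chaine.toList

-- ===== PRECONDITION & SPEC =====
def Spec_datetimelist (chaine : String) (out : List Int) : Prop := out = datetimelist_alt chaine
instance (chaine : String) (out : List Int) : Decidable (Spec_datetimelist chaine out) := by unfold Spec_datetimelist; infer_instance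

-- ===== CLAIM (what is proved, stated in full; the proofs are below) =====
def Claim_equal_datetimelist : Prop := ∀ (chaine : String), Dom_datetimelist chaine → Spec_datetimelist chaine (datetimelist chaine)

-- ===== LEMMAS AND PROOFS =====

-- A's loop written as a recursion on the remaining characters (nb = buf)
def goA (buf : List Char) : List Char → List Int
  | [] => if buf = [] then [] else [digitsVal buf]
  | c :: cs =>
    if isDigC c then goA (buf ++ [c]) cs
    else if buf = [] then goA [] cs
    else digitsVal buf :: goA [] cs

lemma foldA_eq_goA (l : List Char) (done : List Int) (buf : List Char) :
    (let st := l.foldl stepA (done, buf)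
     if st.2 ≠ [] then st.1 ++ [digitsVal st.2] else st.1) = done ++ goA buf l := by
  induction l generalizing done buf with
  | nil =>
    simp only [List.foldl, goA]
    by_cases h : buf = [] <;> simp [h]
  | cons c cs ih =>
    simp only [List.foldl, goA, stepA]
    by_cases hd : isDigC c
    · simpa [hd] using ih done (buf ++ [c])
    · by_cases hb : buf = []
      · simpa [hd, hb] using ih done []
      · simpa [hd, hb] using ih (done ++ [digitsVal buf]) []

-- combined bridge between goA and altGo, by strong induction on length
lemma goA_bridge : ∀ n, ∀ l : List Char, l.length ≤ n →
    (goA [] l = altGo l) ∧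
    (∀ buf : List Char, buf ≠ [] →
      goA buf l = digitsVal (buf ++ l.takeWhile isDigC) :: altGo (l.dropWhile isDigC)) := by
  intro n
  induction n with
  | zero =>
    intro l hl
    have : l = [] := List.length_eq_zero_iff.mp (Nat.le_zero.mp hl)
    subst this
    refine ⟨by simp [goA, altGo], ?_⟩
    intro buf hb
    simp [goA, altGo, hb]
  | succ n ih =>
    intro l hl
    cases l with
    | nil =>
      refine ⟨by simp [goA, altGo], ?_⟩
      intro buf hb
      simp [goA, altGo, hb]
    | cons c cs =>
      have hcs : cs.length ≤ n := Nat.lt_succ_iff.mp (Nat.lt_of_lt_of_le (by simp) hl)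
      constructor
      · by_cases hd : isDigC c
        · have h2 := ((ih cs hcs).2) [c] (by simp)
          simp only [goA, altGo, hd, if_pos]
          simpa using h2
        · simp only [goA, altGo, hd, if_neg, Bool.false_eq_true, not_false_iff]
          simpa [hd] using (ih cs hcs).1
      · intro buf hb
        by_cases hd : isDigC c
        · have h2 := ((ih cs hcs).2) (buf ++ [c]) (by simp)
          simp only [goA, hd, if_pos, List.takeWhile_cons, List.dropWhile_cons]
          simpa [List.append_assoc] using h2
        · have ha : altGo (c :: cs) = altGo cs := by rw [altGo]; simp [hd]
          simp [goA, hd, hb, (ih cs hcs).1, ha]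

-- ===== VERDICT (by name: the statement is the Claim_ definition above) =====
theorem datetimelist_spec : Claim_equal_datetimelist := by
  intro chaine _
  show datetimelist chaine = datetimelist_alt chaine
  unfold datetimelist datetimelist_alt
  have h := foldA_eq_goA chaine.toList [] []
  simp only [List.nil_append] at h
  rw [h, (goA_bridge chaine.toList.length chaine.toList le_rfl).1]
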